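-- pv_equiv track=rewrite | github.com/RamiroFuentes/Procesos-de-separacion-II | function_zoo.py | find_root_interval
-- ===== SOURCE A (Python) =====
-- def find_root_interval(given):
--     i = 0
--     for value in given:
--         if value >=0:
--             P_1 = i
--             P_0 = i-1
--         else:
--             i += 1
--     return P_0,P_1
-- ===== SOURCE B (Python) =====
-- def find_root_interval(given):
--     values = list(given)
--     total = sum(1 for value in values if not (value >= 0))
--     for value in reversed(values):
--         if value >= 0:
--             P_0, P_1 = total - 1, total
--             break
--         total -= 1
--     return P_0, P_1
-- ===== Notes on version B (the rewrite author's own statement) =====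
-- stated objective: alternative
-- what changed: B precomputes the total negative count once and scans the list from the END, returning at the last non-negative element, instead of A's forward scan that keeps a running negative counter and overwrites the result at every non-negative element.
import Mathlib
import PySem

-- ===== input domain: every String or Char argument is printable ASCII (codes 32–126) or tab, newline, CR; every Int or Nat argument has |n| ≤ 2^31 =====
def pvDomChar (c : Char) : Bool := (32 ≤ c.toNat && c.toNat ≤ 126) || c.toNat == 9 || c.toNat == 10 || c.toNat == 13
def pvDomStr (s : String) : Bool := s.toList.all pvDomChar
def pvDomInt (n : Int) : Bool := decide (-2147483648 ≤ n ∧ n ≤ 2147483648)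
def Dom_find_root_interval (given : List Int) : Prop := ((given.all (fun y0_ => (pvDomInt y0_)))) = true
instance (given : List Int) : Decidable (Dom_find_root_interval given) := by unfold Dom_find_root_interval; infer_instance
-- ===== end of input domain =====

-- B: precomputed negative count + reverse scan stopping at the last non-negative element,
-- instead of A's forward scan with a running counter (alternative decomposition, same cost).

-- ===== PORT A =====
-- A's loop state: i (count of negatives so far) and the last (P_0, P_1) assigned, none if unassigned.
def find_root_interval (given : List Int) : Int × Int :=
  let s := given.foldl
    (fun (st : Int × Option (Int × Int)) value =>
      if value ≥ 0 then (st.1, some (st.1 - 1, st.1)) else (st.1 + 1, st.2))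
    (0, none)
  -- Python raises UnboundLocalError when no element is ≥ 0; Pre_ excludes that, default (0,0).
  s.2.getD (0, 0)

-- ===== PORT B =====
-- B's reverse loop: if value ≥ 0 return (total-1, total), else decrement total.
def pvAltGo (total : Int) : List Int → Option (Int × Int)
  | [] => none
  | value :: rest => if value ≥ 0 then some (total - 1, total) else pvAltGo (total - 1) rest

def find_root_interval_alt (given : List Int) : Int × Int :=
  let total : Int := (given.filter (fun value => decide (¬ value ≥ 0))).length
  -- Python raises UnboundLocalError when no element is ≥ 0; Pre_ excludes that, default (0,0).
  (pvAltGo total given.reverse).getD (0, 0)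

-- ===== PRECONDITION & SPEC =====
-- Pre_ excludes lists with no non-negative element: there both Pythons raise UnboundLocalError.
def Pre_find_root_interval (given : List Int) : Prop := ∃ v ∈ given, v ≥ 0
instance (given : List Int) : Decidable (Pre_find_root_interval given) := by unfold Pre_find_root_interval; infer_instance
def pvWitness_find_root_interval : List Int := [-2, 3, -1]
def Spec_find_root_interval (given : List Int) (out : Int × Int) : Prop := out = find_root_interval_alt given
instance (given : List Int) (out : Int × Int) : Decidable (Spec_find_root_interval given out) := by unfold Spec_find_root_interval; infer_instance

-- ===== CLAIM (what is proved, stated in full; the proofs are below) =====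
def Claim_equal_find_root_interval : Prop := ∀ (given : List Int), Dom_find_root_interval given → Pre_find_root_interval given → Spec_find_root_interval given (find_root_interval given)

-- ===== LEMMAS AND PROOFS =====

-- abbreviation for A's loop step (proofs only)
def pvStepA (st : Int × Option (Int × Int)) (value : Int) : Int × Option (Int × Int) :=
  if value ≥ 0 then (st.1, some (st.1 - 1, st.1)) else (st.1 + 1, st.2)

def pvNeg (xs : List Int) : Int := (xs.filter (fun value => decide (¬ value ≥ 0))).length

theorem pvNeg_append (xs : List Int) (v : Int) :
    pvNeg (xs ++ [v]) = pvNeg xs + (if v ≥ 0 then 0 else 1) := by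
  by_cases h : v ≥ 0
  · simp [pvNeg, List.filter_append, h]
  · simp [pvNeg, List.filter_append, h, not_le.mp h]

-- main invariant, by induction from the right
theorem pvFoldA_char (xs : List Int) (i : Int) (p : Option (Int × Int)) :
    xs.foldl pvStepA (i, p) = (i + pvNeg xs, (pvAltGo (i + pvNeg xs) xs.reverse).or p) := by
  induction xs using List.reverseRecOn generalizing i p with
  | nil => simp [pvNeg, pvAltGo, Option.or]
  | append_singleton ys v ih =>
    rw [List.foldl_append, ih, pvNeg_append]
    by_cases h : v ≥ 0
    · simp [pvStepA, pvAltGo, h, Option.or]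
    · simp [pvStepA, pvAltGo, h]
      constructor
      · ring
      · have e : i + (pvNeg ys + 1) - 1 = i + pvNeg ys := by ring
        rw [e]

-- ===== VERDICT (by name: the statement is the Claim_ definition above) =====
theorem find_root_interval_spec : Claim_equal_find_root_interval := by
  intro given _ _
  unfold Spec_find_root_interval find_root_interval find_root_interval_alt
  simp only [show (fun (st : Int × Option (Int × Int)) value =>
      if value ≥ 0 then (st.1, some (st.1 - 1, st.1)) else (st.1 + 1, st.2)) = pvStepA from rfl]
  rw [pvFoldA_char]
  simp [pvNeg, Option.or_none]
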